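-- pv_equiv track=rewrite | github.com/YehorVoitenko/ClanityLangPublic | services/utils.py | mask_word
-- ===== SOURCE A (Python) =====
-- def mask_word(word: str) -> str:
--     result = ""
--     index_in_word = 1
--
--     for char in word:
--         if char == " ":
--             result += char
--             index_in_word = 1
--             continue
--
--         result += f"||{char}||" if index_in_word % 2 == 0 else char
--         index_in_word += 1
--
--     return result
-- ===== SOURCE B (Python) =====
-- def mask_word(word: str) -> str:
--     def mask(tok: str) -> str:
--         return "".join(f"||{c}||" if i % 2 == 1 else c for i, c in enumerate(tok))
--     return " ".join(mask(tok) for tok in word.split(" "))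
-- ===== Notes on version B (the rewrite author's own statement) =====
-- stated objective: simpler
-- what changed: Replaced the flat single pass with a manual reset-on-space counter by tokenizing on the space separator, masking each token at odd 0-based indices via enumerate, and re-joining the tokens.
import Mathlib
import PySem

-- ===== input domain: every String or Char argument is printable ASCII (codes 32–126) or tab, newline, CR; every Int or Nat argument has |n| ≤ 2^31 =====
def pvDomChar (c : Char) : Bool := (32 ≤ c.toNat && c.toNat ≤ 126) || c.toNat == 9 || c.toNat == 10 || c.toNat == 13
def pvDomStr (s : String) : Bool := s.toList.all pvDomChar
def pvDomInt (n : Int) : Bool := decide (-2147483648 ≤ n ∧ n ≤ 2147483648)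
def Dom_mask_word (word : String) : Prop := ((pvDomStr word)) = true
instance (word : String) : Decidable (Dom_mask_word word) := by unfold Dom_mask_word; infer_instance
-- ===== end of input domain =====

-- B replaces A's single pass with a manual reset-on-space counter by split(" ") / mask each token by its 0-based index / " ".join — simpler decomposition, same cost.

-- ===== PORT A =====
-- literal port of A's loop: accumulate result and the 1-based in-word counter, reset at ' '
def mask_word (word : String) : String :=
  let st := word.toList.foldl
    (fun (st : List Char × Int) c =>
      if c = ' ' then (st.1 ++ [c], 1)
      else (st.1 ++ (if st.2 % 2 == 0 then ['|', '|', c, '|', '|'] else [c]), st.2 + 1))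
    ([], 1)
  String.mk st.1

-- ===== PORT B =====
-- "".join(f"||{c}||" if i % 2 == 1 else c for i, c in enumerate(tok))
def pvMaskTok (tok : List Char) : List Char :=
  PySem.Chars.join []
    ((PySem.List.enumerate tok 0).map
      (fun p => if p.1 % 2 == 1 then ['|', '|', p.2, '|', '|'] else [p.2]))

-- " ".join(mask(tok) for tok in word.split(" ")) — split(" ")/join ported at the exact Chars level
def mask_word_alt (word : String) : String :=
  String.mk (PySem.Chars.join [' '] ((PySem.Chars.splitOn word.toList [' ']).map pvMaskTok))

-- ===== PRECONDITION & SPEC =====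
def Spec_mask_word (word : String) (out : String) : Prop := out = mask_word_alt word
instance (word : String) (out : String) : Decidable (Spec_mask_word word out) := by unfold Spec_mask_word; infer_instance

-- ===== CLAIM (what is proved, stated in full; the proofs are below) =====
def Claim_equal_mask_word : Prop := ∀ (word : String), Dom_mask_word word → Spec_mask_word word (mask_word word)

-- ===== LEMMAS AND PROOFS =====

-- recursive characterisation of A's loop
def pvMaskA : List Char → Int → List Char
  | [], _ => []
  | c :: cs, i =>
    if c = ' ' then ' ' :: pvMaskA cs 1
    else (if i % 2 == 0 then ['|', '|', c, '|', '|'] else [c]) ++ pvMaskA cs (i + 1)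

-- recursive characterisation of split(" ")
def pvSplitAux : List Char → List Char → List (List Char)
  | pre, [] => [pre]
  | pre, c :: rest => if c = ' ' then pre :: pvSplitAux [] rest else pvSplitAux (pre ++ [c]) rest

theorem pvFoldA_spec (cs : List Char) : ∀ (acc : List Char) (i : Int),
    (cs.foldl
      (fun (st : List Char × Int) c =>
        if c = ' ' then (st.1 ++ [c], 1)
        else (st.1 ++ (if st.2 % 2 == 0 then ['|', '|', c, '|', '|'] else [c]), st.2 + 1))
      (acc, i)).1 = acc ++ pvMaskA cs i := by
  induction cs with
  | nil => intro acc i; simp [pvMaskA]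
  | cons c cs ih =>
    intro acc i
    rw [List.foldl_cons]
    by_cases h : c = ' '
    · rw [if_pos h, ih]
      simp [pvMaskA, h]
    · rw [if_neg h, ih]
      simp [pvMaskA, h]

theorem pvSplitAux_ne_nil (cs : List Char) : ∀ pre, pvSplitAux pre cs ≠ [] := by
  induction cs with
  | nil => intro pre; simp [pvSplitAux]
  | cons c cs ih =>
    intro pre
    by_cases h : c = ' ' <;> simp [pvSplitAux, h, ih]

theorem pvJoin_nil_sep (parts : List (List Char)) :
    PySem.Chars.join [] parts = parts.flatten := by
  simp only [PySem.Chars.join, List.intercalate]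
  induction parts with
  | nil => simp
  | cons a t ih => cases t <;> simp_all

theorem pvJoin_cons_cons (a b : List Char) (t : List (List Char)) :
    PySem.Chars.join [' '] (a :: b :: t) = a ++ ' ' :: PySem.Chars.join [' '] (b :: t) := by
  simp [PySem.Chars.join, List.intercalate]

theorem pvGo_spec (fuel : Nat) : ∀ (l cur : List Char) (acc : List (List Char)), l.length ≤ fuel →
    PySem.Chars.splitOn.go [' '] fuel l cur acc = acc.reverse ++ pvSplitAux cur.reverse l := by
  induction fuel with
  | zero =>
    intro l cur acc h
    have hl : l = [] := by cases l <;> simp_all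
    subst hl
    rw [PySem.Chars.splitOn.go.eq_def]
    simp [pvSplitAux]
  | succ fuel ih =>
    intro l cur acc h
    cases l with
    | nil =>
      rw [PySem.Chars.splitOn.go.eq_def]
      simp [pvSplitAux]
    | cons c rest =>
      by_cases hc : c = ' '
      · subst hc
        rw [PySem.Chars.splitOn.go.eq_def]
        have hp : [' '].isPrefixOf (' ' :: rest) = true := by simp [List.isPrefixOf]
        simp only [hp, List.length_cons, List.length_nil, List.drop_succ_cons,
          List.drop_zero]
        rw [ih rest [] (cur.reverse :: acc) (by simpa using Nat.le_of_succ_le_succ h)]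
        simp [pvSplitAux]
      · rw [PySem.Chars.splitOn.go.eq_def]
        have hp : [' '].isPrefixOf (c :: rest) = false := by
          simp [List.isPrefixOf, Ne.symm hc]
        simp only [hp, Bool.false_eq_true, if_false]
        rw [ih rest (c :: cur) acc (by simpa using Nat.le_of_succ_le_succ h)]
        simp [pvSplitAux, hc]

theorem pvSplitOn_eq (cs : List Char) :
    PySem.Chars.splitOn cs [' '] = pvSplitAux [] cs := by
  unfold PySem.Chars.splitOn
  rw [pvGo_spec (cs.length + 1) cs [] [] (Nat.le_succ _)]
  simp

theorem pvParity (n : Int) : ((n % 2 == 1) : Bool) = ((n + 1) % 2 == 0) := by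
  by_cases h : n % 2 = 1
  · have : (n + 1) % 2 = 0 := by omega
    simp [h, this]
  · have h0 : n % 2 = 0 := by omega
    have : (n + 1) % 2 = 1 := by omega
    simp [h0, this]

theorem pvMaskTok_append (pre : List Char) (c : Char) :
    pvMaskTok (pre ++ [c]) =
      pvMaskTok pre ++ (if ((pre.length : Int) % 2 == 1) then ['|', '|', c, '|', '|'] else [c]) := by
  unfold pvMaskTok
  rw [PySem.List.enumerate_append, pvJoin_nil_sep, pvJoin_nil_sep]
  simp [PySem.List.enumerate]

theorem pvMain (cs : List Char) : ∀ (pre : List Char),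
    PySem.Chars.join [' '] ((pvSplitAux pre cs).map pvMaskTok)
      = pvMaskTok pre ++ pvMaskA cs ((pre.length : Int) + 1) := by
  induction cs with
  | nil => intro pre; simp [pvSplitAux, pvMaskA, PySem.Chars.join, List.intercalate]
  | cons c rest ih =>
    intro pre
    by_cases hc : c = ' '
    · subst hc
      have hne : (pvSplitAux [] rest).map pvMaskTok ≠ [] := by
        simpa using pvSplitAux_ne_nil rest []
      obtain ⟨x, xs, hx⟩ := List.exists_cons_of_ne_nil hne
      have h2 := ih []
      rw [hx] at h2
      simp only [pvSplitAux, if_true, List.map_cons]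
      rw [hx, pvJoin_cons_cons, h2]
      simp [pvMaskA, pvMaskTok, PySem.List.enumerate, pvJoin_nil_sep]
    · simp only [pvSplitAux, if_neg hc]
      rw [ih (pre ++ [c]), pvMaskTok_append]
      have hl : (((pre ++ [c]).length : Int) + 1) = ((pre.length : Int) + 1) + 1 := by
        simp
      rw [hl, pvParity]
      simp [pvMaskA, hc]

-- ===== VERDICT (by name: the statement is the Claim_ definition above) =====
theorem mask_word_spec : Claim_equal_mask_word := by
  intro word _
  unfold Spec_mask_word mask_word mask_word_alt
  simp only []
  rw [pvSplitOn_eq, pvMain word.toList []]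
  rw [show (([] : List Char).length : Int) + 1 = 1 from rfl]
  rw [pvFoldA_spec word.toList [] 1]
  simp [pvMaskTok, PySem.List.enumerate]
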